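-- pv_equiv track=rewrite | github.com/usalko/nogil | Lib/dis.py | pretty_flags
-- ===== SOURCE A (Python) =====
-- COMPILER_FLAG_NAMES = {
--      1: "OPTIMIZED",
--      2: "NEWLOCALS",
--      4: "VARARGS",
--      8: "VARKEYWORDS",
--     16: "NESTED",
--     32: "GENERATOR",
--     64: "NOFREE",
--    128: "COROUTINE",
--    256: "ITERABLE_COROUTINE",
--    512: "ASYNC_GENERATOR",
-- }
--
-- def pretty_flags(flags):
--     """Return pretty representation of code flags."""
--     names = []
--     for i in range(32):
--         flag = 1<<i
--         if flags & flag: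
--             names.append(COMPILER_FLAG_NAMES.get(flag, hex(flag)))
--             flags ^= flag
--             if not flags:
--                 break
--     else:
--         names.append(hex(flags))
--     return ", ".join(names)
-- ===== SOURCE B (Python) =====
-- COMPILER_FLAG_NAMES = {
--      1: "OPTIMIZED",
--      2: "NEWLOCALS",
--      4: "VARARGS",
--      8: "VARKEYWORDS",
--     16: "NESTED",
--     32: "GENERATOR",
--     64: "NOFREE",
--    128: "COROUTINE",
--    256: "ITERABLE_COROUTINE",
--    512: "ASYNC_GENERATOR",
-- }
--
-- def pretty_flags(flags):
--     """Return pretty representation of code flags."""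
--     names = []
--     low = flags & 0xFFFFFFFF
--     remaining = flags & ~0xFFFFFFFF
--     while low:
--         flag = low & -low          # lowest set bit, ascending order
--         names.append(COMPILER_FLAG_NAMES.get(flag, hex(flag)))
--         low ^= flag
--     # show the residue in hex; if no flag named anything, show it anyway (0x0)
--     if remaining or not names:
--         names.append(hex(remaining))
--     return ", ".join(names)
-- ===== Notes on version B (the rewrite author's own statement) =====
-- stated objective: idiomatic
-- what changed: A scans every one of the thirty-two low bit positions with a for/else-break; B splits flags into its low word and the residue, peels only the set bits off the low word with flag = low & -low in a while loop, and appends the residual hex when there is a residue or no name was produced.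
import Mathlib
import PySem

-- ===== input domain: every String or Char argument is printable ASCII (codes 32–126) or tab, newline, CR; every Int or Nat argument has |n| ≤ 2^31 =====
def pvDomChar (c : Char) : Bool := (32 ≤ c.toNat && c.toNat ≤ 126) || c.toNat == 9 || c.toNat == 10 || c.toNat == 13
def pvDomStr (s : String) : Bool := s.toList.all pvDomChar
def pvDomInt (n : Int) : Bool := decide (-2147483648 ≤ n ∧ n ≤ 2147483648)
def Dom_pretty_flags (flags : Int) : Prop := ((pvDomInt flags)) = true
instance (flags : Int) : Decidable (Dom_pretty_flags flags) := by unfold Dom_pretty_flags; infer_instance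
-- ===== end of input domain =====

-- B replaces A's fixed scan over all 32 bit positions by a while-loop that peels only the set
-- bits off the low 32-bit part (flag = low & -low), appending the residual hex when there is a
-- residue or no name was produced; same return value on the whole domain (objective: idiomatic).

-- ===== PORT A =====

-- hex(n) for Python ints (lowercase digits, '0x' prefix, '-' sign); hand-ported, exact for all Int.
def hexDigit (n : Nat) : Char := if n < 10 then Char.ofNat (48 + n) else Char.ofNat (87 + n)

def natHexChars (n : Nat) : List Char :=
  if n = 0 then [] else natHexChars (n / 16) ++ [hexDigit (n % 16)]
decreasing_by exact Nat.div_lt_self (Nat.pos_of_ne_zero (by assumption)) (by norm_num)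

def pyHex (n : Int) : String :=
  if n < 0 then String.ofList ('-' :: '0' :: 'x' :: natHexChars n.natAbs)
  else if n = 0 then "0x0"
  else String.ofList ('0' :: 'x' :: natHexChars n.toNat)

def COMPILER_FLAG_NAMES : PySem.Dict Int String := PySem.Dict.mk
  [(1, "OPTIMIZED"), (2, "NEWLOCALS"), (4, "VARARGS"), (8, "VARKEYWORDS"),
   (16, "NESTED"), (32, "GENERATOR"), (64, "NOFREE"), (128, "COROUTINE"),
   (256, "ITERABLE_COROUTINE"), (512, "ASYNC_GENERATOR")]

-- COMPILER_FLAG_NAMES.get(flag, hex(flag))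
def entryOf (flag : Int) : String := PySem.Dict.getD COMPILER_FLAG_NAMES flag (pyHex flag)

-- A's 'for i in range(32): …' with break/else; fuel = number of remaining iterations,
-- the fuel-0 case is the for-else clause (append hex of the surviving flags).
def loopA (fuel : Nat) (i : Nat) (flags : Int) (names : List String) : List String :=
  match fuel with
  | 0 => names ++ [pyHex flags]
  | f + 1 =>
    let flag : Int := (1 : Int) <<< i
    if PySem.Int.band flags flag ≠ 0 then
      let names' := names ++ [entryOf flag]
      let flags' := PySem.Int.bxor flags flag
      if flags' = 0 then names' else loopA f (i + 1) flags' names'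
    else loopA f (i + 1) flags names

def pretty_flags (flags : Int) : String :=
  PySem.Str.join ", " (loopA 32 0 flags [])

-- ===== PORT B =====

-- B's 'while low: flag = low & -low; …'; the loop runs once per set bit of low and
-- low < 2^32 here, so 32 units of fuel only make the recursion structural (never exhausted).
def loopB (fuel : Nat) (low : Int) (names : List String) : List String :=
  match fuel with
  | 0 => names
  | f + 1 =>
    if low ≠ 0 then
      let flag := PySem.Int.band low (-low)
      loopB f (PySem.Int.bxor low flag) (names ++ [entryOf flag])
    else names

def pretty_flags_alt (flags : Int) : String :=
  let low := PySem.Int.band flags 4294967295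
  let remaining := PySem.Int.band flags (Int.not 4294967295)
  let names := loopB 32 low []
  let names' := if remaining ≠ 0 ∨ names = [] then names ++ [pyHex remaining] else names
  PySem.Str.join ", " names'

-- ===== PRECONDITION & SPEC =====
def Spec_pretty_flags (flags : Int) (out : String) : Prop := out = pretty_flags_alt flags
instance (flags : Int) (out : String) : Decidable (Spec_pretty_flags flags out) := by unfold Spec_pretty_flags; infer_instance

-- ===== CLAIM (what is proved, stated in full; the proofs are below) =====
def Claim_equal_pretty_flags : Prop := ∀ (flags : Int), Dom_pretty_flags flags → Spec_pretty_flags flags (pretty_flags flags)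

-- ===== LEMMAS AND PROOFS =====

-- The entries contributed by the set bits of n, read from bit position i upward.
def entriesFrom (i : Nat) (n : Nat) : List String :=
  if n = 0 then []
  else (if n % 2 = 1 then [entryOf ((1 : Int) <<< i)] else []) ++ entriesFrom (i + 1) (n / 2)
decreasing_by exact Nat.div_lt_self (Nat.pos_of_ne_zero (by assumption)) (by norm_num)

theorem loopA_succ (f i : Nat) (flags : Int) (names : List String) :
    loopA (f + 1) i flags names =
      (if PySem.Int.band flags ((1 : Int) <<< i) ≠ 0 then
        (if PySem.Int.bxor flags ((1 : Int) <<< i) = 0 then names ++ [entryOf ((1 : Int) <<< i)]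
         else loopA f (i + 1) (PySem.Int.bxor flags ((1 : Int) <<< i)) (names ++ [entryOf ((1 : Int) <<< i)]))
      else loopA f (i + 1) flags names) := rfl

theorem loopB_succ (f : Nat) (low : Int) (names : List String) :
    loopB (f + 1) low names =
      (if low ≠ 0 then
        loopB f (PySem.Int.bxor low (PySem.Int.band low (-low)))
          (names ++ [entryOf (PySem.Int.band low (-low))])
      else names) := rfl

theorem entriesFrom_zero (i : Nat) : entriesFrom i 0 = [] := by
  unfold entriesFrom; simp

theorem entriesFrom_ne_nil : ∀ (n : Nat), n ≠ 0 → ∀ (i : Nat), entriesFrom i n ≠ [] := by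
  intro n
  induction n using Nat.strong_induction_on with
  | _ n ih =>
    intro hn i
    rw [entriesFrom]
    rcases Nat.mod_two_eq_zero_or_one n with hp | hp
    · have hq : n / 2 ≠ 0 := by omega
      simpa [hn, hp] using ih (n / 2) (by omega) hq (i + 1)
    · simp [hn, hp]

-- (2^i * x) &&& (2^i * y) = 2^i * (x &&& y), and the same for xor (via shiftLeft distributivity)
theorem nat_mul_pow_and (i x y : Nat) : (2 ^ i * x) &&& (2 ^ i * y) = 2 ^ i * (x &&& y) := by
  have h : ∀ z : Nat, 2 ^ i * z = z <<< i := by intro z; rw [Nat.shiftLeft_eq]; ring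
  rw [h, h, h, Nat.shiftLeft_and_distrib]

theorem nat_mul_pow_xor (i x y : Nat) : (2 ^ i * x) ^^^ (2 ^ i * y) = 2 ^ i * (x ^^^ y) := by
  have h : ∀ z : Nat, 2 ^ i * z = z <<< i := by intro z; rw [Nat.shiftLeft_eq]; ring
  rw [h, h, h, Nat.shiftLeft_xor_distrib]

theorem int_one_shiftLeft (i : Nat) : ((1 : Int) <<< i) = ((2 ^ i : Nat) : Int) := by
  rw [Int.shiftLeft_eq]; push_cast; ring

-- band of a nonnegative multiple of 2^i with 2^i
theorem band_pos_bit (i n : Nat) :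
    PySem.Int.band ((2 ^ i * n : Nat) : Int) ((1 : Int) <<< i) =
      (if n % 2 = 1 then (1 : Int) <<< i else 0) := by
  rw [int_one_shiftLeft, PySem.Int.band_natCast]
  have h : (2 ^ i * n) &&& 2 ^ i = 2 ^ i * (n &&& 1) := by
    have := nat_mul_pow_and i n 1
    simpa using this
  rw [h, Nat.and_one_is_mod]
  rcases Nat.mod_two_eq_zero_or_one n with h2 | h2 <;> simp [h2]

-- bxor of a nonnegative multiple of 2^i with 2^i (odd quotient): clears the bit
theorem bxor_pos_bit (i n : Nat) (hodd : n % 2 = 1) :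
    PySem.Int.bxor ((2 ^ i * n : Nat) : Int) ((1 : Int) <<< i) =
      ((2 ^ (i + 1) * (n / 2) : Nat) : Int) := by
  rw [int_one_shiftLeft, PySem.Int.bxor_natCast]
  have h : (2 ^ i * n) ^^^ 2 ^ i = 2 ^ i * (n ^^^ 1) := by
    have := nat_mul_pow_xor i n 1
    simpa using this
  rw [h, Nat.xor_one_of_odd (Nat.odd_iff.mpr hodd)]
  congr 1
  have : n - 1 = 2 * (n / 2) := by omega
  rw [this, pow_succ]; ring

-- the Nat-level core of the negative cases: complement of 2^i*n inside 32 bits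
theorem nat_compl_testBit (i n j : Nat) (hn : 2 ^ i * n < 2 ^ 32) :
    (2 ^ 32 - (2 ^ i * n + 1)).testBit j = (decide (j < 32) && !(2 ^ i * n).testBit j) := by
  exact Nat.testBit_two_pow_sub_succ hn j

theorem band_neg_bit (i n : Nat) (hi : i < 32) (hn : 2 ^ i * n < 2 ^ 32) :
    PySem.Int.band (-4294967296 + ((2 ^ i * n : Nat) : Int)) ((1 : Int) <<< i) =
      (if n % 2 = 1 then (1 : Int) <<< i else 0) := by
  rw [int_one_shiftLeft]
  have hneg : -4294967296 + ((2 ^ i * n : Nat) : Int) < 0 := by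
    have : ((2 ^ i * n : Nat) : Int) < 4294967296 := by exact_mod_cast hn
    omega
  have hb : (0 : Int) ≤ ((2 ^ i * n : Nat) : Int) := by positivity
  unfold PySem.Int.band
  rw [if_neg (by omega), if_pos (by positivity)]
  have harg : (-(-4294967296 + ((2 ^ i * n : Nat) : Int)) - 1).toNat = 2 ^ 32 - (2 ^ i * n + 1) := by
    have h1 : ((2 ^ i * n : Nat) : Int) ≤ 4294967295 := by exact_mod_cast Nat.lt_succ_iff.mp (by simpa using hn)
    omega
  rw [harg]
  have htn : (((2 ^ i : Nat) : Int)).toNat = 2 ^ i := Int.toNat_natCast _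
  rw [htn]
  have hbit : (2 ^ i) &&& (2 ^ 32 - (2 ^ i * n + 1)) = if n % 2 = 1 then 0 else 2 ^ i := by
    have hc : (2 ^ 32 - (2 ^ i * n + 1)).testBit i = !(decide (n % 2 = 1)) := by
      rw [nat_compl_testBit i n i hn]
      have : (2 ^ i * n).testBit i = decide (n % 2 = 1) := by
        rw [Nat.testBit_two_pow_mul]
        simp [Nat.testBit_zero]
      simp [hi, this]
    rw [Nat.and_comm, Nat.and_two_pow, hc]
    rcases Nat.mod_two_eq_zero_or_one n with h2 | h2 <;> simp [h2]
  rw [hbit]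
  rcases Nat.mod_two_eq_zero_or_one n with h2 | h2 <;> simp [h2]

theorem bxor_neg_bit (i n : Nat) (hi : i < 32) (hodd : n % 2 = 1) (hn : 2 ^ i * n < 2 ^ 32) :
    PySem.Int.bxor (-4294967296 + ((2 ^ i * n : Nat) : Int)) ((1 : Int) <<< i) =
      -4294967296 + ((2 ^ (i + 1) * (n / 2) : Nat) : Int) := by
  rw [int_one_shiftLeft]
  have hneg : -4294967296 + ((2 ^ i * n : Nat) : Int) < 0 := by
    have : ((2 ^ i * n : Nat) : Int) < 4294967296 := by exact_mod_cast hn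
    omega
  have hn' : 2 ^ (i + 1) * (n / 2) < 2 ^ 32 := by
    have h2 : 2 * (n / 2) ≤ n := by omega
    have : 2 ^ (i + 1) * (n / 2) ≤ 2 ^ i * n := by
      calc 2 ^ (i + 1) * (n / 2) = 2 ^ i * (2 * (n / 2)) := by rw [pow_succ]; ring
        _ ≤ 2 ^ i * n := Nat.mul_le_mul_left _ h2
    omega
  unfold PySem.Int.bxor
  rw [if_neg (by omega), if_pos (by positivity)]
  have harg : (-(-4294967296 + ((2 ^ i * n : Nat) : Int)) - 1).toNat = 2 ^ 32 - (2 ^ i * n + 1) := by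
    have h1 : ((2 ^ i * n : Nat) : Int) ≤ 4294967295 := by exact_mod_cast Nat.lt_succ_iff.mp (by simpa using hn)
    omega
  rw [harg]
  have htn : (((2 ^ i : Nat) : Int)).toNat = 2 ^ i := Int.toNat_natCast _
  rw [htn]
  have hx : (2 ^ 32 - (2 ^ i * n + 1)) ^^^ 2 ^ i = 2 ^ 32 - (2 ^ (i + 1) * (n / 2) + 1) := by
    apply Nat.eq_of_testBit_eq
    intro j
    rw [Nat.testBit_xor, nat_compl_testBit i n j hn, nat_compl_testBit (i + 1) (n / 2) j hn',
        Nat.testBit_two_pow]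
    have hstep : (2 ^ i * n) ^^^ 2 ^ i = 2 ^ (i + 1) * (n / 2) := by
      have := bxor_pos_bit i n hodd
      rw [int_one_shiftLeft, PySem.Int.bxor_natCast] at this
      exact_mod_cast this
    have hb : (2 ^ (i + 1) * (n / 2)).testBit j = ((2 ^ i * n).testBit j ^^ (2 ^ i).testBit j) := by
      rw [← hstep, Nat.testBit_xor]
    rw [hb, Nat.testBit_two_pow]
    by_cases hj : j < 32
    · cases h1 : (2 ^ i * n).testBit j <;> cases h2 : decide (i = j) <;> simp_all
    · have : ¬ i = j := by omega
      simp [hj, this]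
  rw [hx]
  rw [Nat.cast_sub (by omega : 2 ^ (i + 1) * (n / 2) + 1 ≤ 2 ^ 32)]
  have h1 : ((2 ^ 32 : Nat) : Int) = 4294967296 := by norm_num
  rw [h1]; omega

-- lowest set bit: low & -low for low = 2^i * n with n odd
theorem lowbit_eq (i n : Nat) (hodd : n % 2 = 1) :
    PySem.Int.band ((2 ^ i * n : Nat) : Int) (-((2 ^ i * n : Nat) : Int)) = (1 : Int) <<< i := by
  have hpos : 0 < 2 ^ i * n := Nat.mul_pos (Nat.two_pow_pos i) (by omega)
  have hpos' : (0 : Int) < ((2 ^ i * n : Nat) : Int) := by exact_mod_cast hpos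
  unfold PySem.Int.band
  rw [if_pos (by omega), if_neg (by omega)]
  have harg : (-(-((2 ^ i * n : Nat) : Int)) - 1).toNat = 2 ^ i * n - 1 := by omega
  have htn : (((2 ^ i * n : Nat) : Int)).toNat = 2 ^ i * n := Int.toNat_natCast _
  rw [harg, htn]
  have hand : (2 ^ i * n) &&& (2 ^ i * n - 1) = 2 ^ i * (n - 1) := by
    have hmul0 : 2 ^ i * n = 2 ^ i * (n - 1) + 2 ^ i := by
      have hn1 : n = (n - 1) + 1 := by omega
      conv_lhs => rw [hn1]
      ring
    have hsplit : 2 ^ i * n - 1 = 2 ^ i * (n - 1) + (2 ^ i - 1) := by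
      rw [hmul0]
      exact Nat.add_sub_assoc Nat.one_le_two_pow _
    apply Nat.eq_of_testBit_eq
    intro j
    rw [Nat.testBit_and, hsplit, Nat.testBit_two_pow_mul_add _ (by have : (1:Nat) ≤ 2 ^ i := Nat.one_le_two_pow; omega),
        Nat.testBit_two_pow_mul, Nat.testBit_two_pow_mul]
    by_cases hj : j < i
    · have : ¬ j ≥ i := by omega
      simp [hj, this]
    · have hge : j ≥ i := by omega
      simp [hj, hge]
      by_cases hj0 : j - i = 0
      · have h0 : (n - 1).testBit 0 = false := by
          have : (n - 1) % 2 = 0 := by omega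
          simp [Nat.testBit, this]
        have h1 : n.testBit 0 = true := by
          simp [Nat.testBit, hodd]
        simp [hj0, h0, h1]
      · have hb : n.testBit (j - i) = (n - 1).testBit (j - i) := by
          have hn1 : n = (n - 1) + 1 := by omega
          have heven : (n - 1) % 2 = 0 := by omega
          rw [hn1]
          obtain ⟨j', hj'⟩ : ∃ j', j - i = j' + 1 := ⟨j - i - 1, by omega⟩
          rw [hj']
          have h2 : n - 1 + 1 = 2 * ((n - 1) / 2) + 1 := by omega
          rw [h2, Nat.testBit_succ, Nat.testBit_succ]
          congr 1
          omega
        simp [hb]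
  rw [hand]
  have hmul : 2 ^ i * n = 2 ^ i * (n - 1) + 2 ^ i := by
    have hn1 : n = (n - 1) + 1 := by omega
    conv_lhs => rw [hn1]
    ring
  have hsub : 2 ^ i * n - 2 ^ i * (n - 1) = 2 ^ i := by
    rw [hmul, Nat.add_sub_cancel_left]
  rw [hsub, int_one_shiftLeft]

-- characterization of A's loop
theorem loopA_char : ∀ (fuel i : Nat), i + fuel = 32 → ∀ (n : Nat), n < 2 ^ fuel →
    ∀ (r : Int), (r = 0 ∨ r = -4294967296) → ∀ (names : List String),
    loopA fuel i (r + ((2 ^ i * n : Nat) : Int)) names =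
      names ++ entriesFrom i n ++ (if r ≠ 0 ∨ n = 0 then [pyHex r] else []) := by
  intro fuel
  induction fuel with
  | zero =>
    intro i hi n hn r hr names
    interval_cases n
    simp [loopA, entriesFrom_zero]
  | succ f ih =>
    intro i hi n hn r hr names
    have hi32 : i < 32 := by omega
    have hnbound : 2 ^ i * n < 2 ^ 32 := by
      calc 2 ^ i * n < 2 ^ i * 2 ^ (f + 1) := by
            exact mul_lt_mul_of_pos_left hn (by positivity)
        _ = 2 ^ 32 := by rw [← pow_add, show i + (f + 1) = 32 from hi]
    have hband : PySem.Int.band (r + ((2 ^ i * n : Nat) : Int)) ((1 : Int) <<< i) =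
        (if n % 2 = 1 then (1 : Int) <<< i else 0) := by
      rcases hr with hr | hr <;> subst hr
      · simpa using band_pos_bit i n
      · exact band_neg_bit i n hi32 hnbound
    rcases Nat.mod_two_eq_zero_or_one n with hpar | hpar
    · -- bit i not set: skip
      have hz : PySem.Int.band (r + ((2 ^ i * n : Nat) : Int)) ((1 : Int) <<< i) = 0 := by
        rw [hband]; simp [hpar]
      have hval : r + ((2 ^ i * n : Nat) : Int) = r + ((2 ^ (i + 1) * (n / 2) : Nat) : Int) := by
        congr 2
        have : n = 2 * (n / 2) := by omega
        conv_lhs => rw [this]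
        rw [pow_succ]; ring
      rw [loopA_succ, if_neg (fun h => h hz)]
      rw [hval, ih (i + 1) (by omega) (n / 2) (by omega) r hr names]
      have hentries : entriesFrom i n = entriesFrom (i + 1) (n / 2) := by
        by_cases hn0 : n = 0
        · subst hn0; simp [entriesFrom_zero]
        · rw [entriesFrom]; simp [hn0, hpar]
      have hcond : (if r ≠ 0 ∨ n / 2 = 0 then [pyHex r] else ([] : List String)) =
          (if r ≠ 0 ∨ n = 0 then [pyHex r] else []) := by
        have hhalf : n / 2 = 0 ↔ n = 0 := by omega
        by_cases hr0 : r = 0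
        · simp [hr0, hhalf]
        · simp [hr0]
      rw [hentries, hcond]
    · -- bit i set
      have hnz : PySem.Int.band (r + ((2 ^ i * n : Nat) : Int)) ((1 : Int) <<< i) ≠ 0 := by
        rw [hband, if_pos hpar, int_one_shiftLeft]
        positivity
      have hxor : PySem.Int.bxor (r + ((2 ^ i * n : Nat) : Int)) ((1 : Int) <<< i) =
          r + ((2 ^ (i + 1) * (n / 2) : Nat) : Int) := by
        rcases hr with hr | hr <;> subst hr
        · simpa using bxor_pos_bit i n hpar
        · exact bxor_neg_bit i n hi32 hpar hnbound
      have hn0 : n ≠ 0 := by omega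
      have hentries : entriesFrom i n = [entryOf ((1 : Int) <<< i)] ++ entriesFrom (i + 1) (n / 2) := by
        rw [entriesFrom]; simp [hn0, hpar]
      rw [loopA_succ, if_pos hnz, hxor]
      by_cases hbreak : r + ((2 ^ (i + 1) * (n / 2) : Nat) : Int) = 0
      · -- break: new flags are zero, so r = 0 and n / 2 = 0
        have hq : r = 0 ∧ n / 2 = 0 := by
          rcases hr with hr | hr <;> subst hr
          · constructor; rfl
            have : ((2 ^ (i + 1) * (n / 2) : Nat) : Int) = 0 := by omega
            have : 2 ^ (i + 1) * (n / 2) = 0 := by exact_mod_cast this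
            have h2 : (0:Nat) < 2 ^ (i + 1) := by positivity
            exact (Nat.mul_eq_zero.mp this).resolve_left (by omega)
          · exfalso
            have hq' : 2 ^ (i + 1) * (n / 2) ≤ 2 ^ i * n := by
              calc 2 ^ (i + 1) * (n / 2) = 2 ^ i * (2 * (n / 2)) := by rw [pow_succ]; ring
                _ ≤ 2 ^ i * n := Nat.mul_le_mul_left _ (by omega)
            have : 2 ^ (i + 1) * (n / 2) < 2 ^ 32 := by omega
            have : ((2 ^ (i + 1) * (n / 2) : Nat) : Int) < 4294967296 := by exact_mod_cast this
            omega
        rw [if_pos hbreak, hentries]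
        have : entriesFrom (i + 1) (n / 2) = [] := by rw [hq.2]; exact entriesFrom_zero _
        simp [this, hq.1, hn0]
      · rw [if_neg hbreak]
        rw [ih (i + 1) (by omega) (n / 2) (by omega) r hr (names ++ [entryOf ((1 : Int) <<< i)])]
        have hcond : (if r ≠ 0 ∨ n / 2 = 0 then [pyHex r] else ([] : List String)) =
            (if r ≠ 0 ∨ n = 0 then [pyHex r] else []) := by
          by_cases hr0 : r = 0
          · have hq : n / 2 ≠ 0 := by
              intro h
              apply hbreak
              simp [hr0, h]
            simp [hr0, hq, hn0]
          · simp [hr0]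
        rw [hentries, hcond]
        simp
-- characterization of B's loop, by strong induction on n
theorem loopB_char : ∀ (n : Nat), ∀ (fuel i : Nat), n < 2 ^ fuel → ∀ (names : List String),
    loopB fuel ((2 ^ i * n : Nat) : Int) names = names ++ entriesFrom i n := by
  intro n
  induction n using Nat.strong_induction_on with
  | _ n ih =>
    intro fuel i hn names
    by_cases hn0 : n = 0
    · subst hn0
      cases fuel <;> simp [loopB, entriesFrom_zero]
    · have hfuel : fuel ≠ 0 := by
        intro h; subst h; simp at hn; omega
      obtain ⟨f, rfl⟩ : ∃ f, fuel = f + 1 := ⟨fuel - 1, by omega⟩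
      rcases Nat.mod_two_eq_zero_or_one n with hpar | hpar
      · -- n even: same Int value, shift viewpoint to i+1
        have hval : ((2 ^ i * n : Nat) : Int) = ((2 ^ (i + 1) * (n / 2) : Nat) : Int) := by
          congr 1
          have : n = 2 * (n / 2) := by omega
          conv_lhs => rw [this]
          rw [pow_succ]; ring
        rw [hval, ih (n / 2) (by omega) (f + 1) (i + 1) (by omega) names]
        have : entriesFrom i n = entriesFrom (i + 1) (n / 2) := by
          rw [entriesFrom]; simp [hn0, hpar]
        rw [this]
      · -- n odd: peel bit i
        have hpos : (0 : Int) < ((2 ^ i * n : Nat) : Int) := by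
          have : 0 < 2 ^ i * n := by positivity
          exact_mod_cast this
        rw [loopB_succ, if_pos (by omega), lowbit_eq i n hpar]
        have hx : PySem.Int.bxor ((2 ^ i * n : Nat) : Int) ((1:Int) <<< i) =
            ((2 ^ (i + 1) * (n / 2) : Nat) : Int) := bxor_pos_bit i n hpar
        rw [hx, ih (n / 2) (by omega) f (i + 1) (by
          have : n < 2 ^ (f + 1) := hn
          have : n / 2 < 2 ^ f := by
            rcases Nat.eq_or_lt_of_le (Nat.one_le_iff_ne_zero.mpr hn0) with h | h <;> omega
          exact this) (names ++ [entryOf ((1:Int) <<< i)])]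
        have hE : entriesFrom i n = [entryOf ((1 : Int) <<< i)] ++ entriesFrom (i + 1) (n / 2) := by
          rw [entriesFrom]; simp [hn0, hpar]
        rw [hE]
        simp

-- decomposition of flags on the domain: low 32 bits as a Nat and the (sign) remainder
theorem band_low (flags : Int) (h : Dom_pretty_flags flags) :
    PySem.Int.band flags 4294967295 =
      flags + (if flags < 0 then 4294967296 else 0) := by
  unfold Dom_pretty_flags pvDomInt at h
  have hb : -2147483648 ≤ flags ∧ flags ≤ 2147483648 := by simpa using h
  by_cases hneg : flags < 0
  · unfold PySem.Int.band
    rw [if_neg (by omega), if_pos (by norm_num)]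
    have harg : (-flags - 1).toNat = (-flags - 1).toNat := rfl
    have hlt : (-flags - 1).toNat < 2 ^ 32 := by omega
    have hand : (4294967295 : Int).toNat &&& (-flags - 1).toNat = (-flags - 1).toNat := by
      have : (4294967295 : Int).toNat = 2 ^ 32 - 1 := by decide
      rw [this, Nat.and_comm, Nat.and_two_pow_sub_one_eq_mod, Nat.mod_eq_of_lt hlt]
    rw [hand]
    have : ((4294967295 : Int).toNat : Int) = 4294967295 := by norm_num
    simp only [if_pos hneg]
    omega
  · unfold PySem.Int.band
    rw [if_pos (by omega), if_pos (by norm_num)]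
    have hlt : flags.toNat < 2 ^ 32 := by omega
    have hand : flags.toNat &&& (4294967295 : Int).toNat = flags.toNat := by
      have : (4294967295 : Int).toNat = 2 ^ 32 - 1 := by decide
      rw [this, Nat.and_two_pow_sub_one_eq_mod, Nat.mod_eq_of_lt hlt]
    rw [hand]
    simp only [if_neg hneg]
    omega

theorem band_rem (flags : Int) (h : Dom_pretty_flags flags) :
    PySem.Int.band flags (Int.not 4294967295) =
      (if flags < 0 then -4294967296 else 0) := by
  unfold Dom_pretty_flags pvDomInt at h
  have hb : -2147483648 ≤ flags ∧ flags ≤ 2147483648 := by simpa using h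
  have hnotv : (Int.not 4294967295) = -4294967296 := by decide
  rw [hnotv]
  by_cases hneg : flags < 0
  · unfold PySem.Int.band
    rw [if_neg (by omega), if_neg (by norm_num)]
    have harg : ((-(-4294967296 : Int) - 1)).toNat = 2 ^ 32 - 1 := by decide
    have hlt : (-flags - 1).toNat < 2 ^ 32 := by omega
    have hor : (-flags - 1).toNat ||| (2 ^ 32 - 1) = 2 ^ 32 - 1 := by
      apply Nat.eq_of_testBit_eq
      intro j
      rw [Nat.testBit_or]
      have h1 : (2 ^ 32 - 1 : Nat).testBit j = decide (j < 32) := by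
        have : (2 ^ 32 - 1 : Nat) = 2 ^ 32 - (0 + 1) := by norm_num
        rw [this, Nat.testBit_two_pow_sub_succ (by positivity)]
        simp
      rw [h1]
      by_cases hj : j < 32
      · simp [hj]
      · have hkey : (-flags - 1).toNat = (-flags).toNat - 1 := by omega
        have hlt2 : (-flags).toNat - 1 < 2 ^ j :=
          lt_of_lt_of_le (by omega : (-flags).toNat - 1 < 2 ^ 32)
            (Nat.pow_le_pow_right (by norm_num) (by omega))
        simp [hj, hkey, Nat.testBit_lt_two_pow hlt2]
    rw [harg, hor]
    simp only [if_pos hneg]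
    norm_num
  · unfold PySem.Int.band
    rw [if_pos (by omega), if_neg (by norm_num)]
    have harg : ((-(-4294967296 : Int) - 1)).toNat = 2 ^ 32 - 1 := by decide
    have hlt : flags.toNat < 2 ^ 32 := by omega
    have hand : flags.toNat &&& (2 ^ 32 - 1) = flags.toNat := by
      rw [Nat.and_two_pow_sub_one_eq_mod, Nat.mod_eq_of_lt hlt]
    rw [harg, hand]
    simp only [if_neg hneg]
    omega

-- ===== VERDICT (by name: the statement is the Claim_ definition above) =====
theorem pretty_flags_spec : Claim_equal_pretty_flags := by
  intro flags hdom
  unfold Spec_pretty_flags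
  simp only [pretty_flags, pretty_flags_alt]
  have hb : -2147483648 ≤ flags ∧ flags ≤ 2147483648 := by
    unfold Dom_pretty_flags pvDomInt at hdom; simpa using hdom
  set r : Int := if flags < 0 then -4294967296 else 0 with hr
  set m : Nat := (flags - r).toNat with hm
  have hrcases : r = 0 ∨ r = -4294967296 := by
    by_cases h : flags < 0 <;> simp [hr, h]
  have hflags : flags = r + (m : Int) := by
    have : 0 ≤ flags - r := by by_cases h : flags < 0 <;> simp [hr, h] <;> omega
    omega
  have hmlt : m < 2 ^ 32 := by
    by_cases h : flags < 0 <;> simp [hr, h] at hm ⊢ <;> omega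
  -- A side
  have hA : loopA 32 0 flags [] = entriesFrom 0 m ++ (if r ≠ 0 ∨ m = 0 then [pyHex r] else []) := by
    have := loopA_char 32 0 (by norm_num) m hmlt r hrcases []
    simpa [hflags] using this
  -- B side
  have hlow : PySem.Int.band flags 4294967295 = (m : Int) := by
    rw [band_low flags hdom]
    by_cases h : flags < 0 <;> simp [hr, h] at hflags ⊢ <;> omega
  have hrem : PySem.Int.band flags (Int.not 4294967295) = r := by
    rw [band_rem flags hdom]
  have hB : loopB 32 (PySem.Int.band flags 4294967295) [] = entriesFrom 0 m := by
    rw [hlow]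
    have := loopB_char m 32 0 hmlt []
    simpa using this
  rw [hA, hrem, hB]
  -- align the two hex-append conditions: names = [] ↔ m = 0
  have hnil : entriesFrom 0 m = [] ↔ m = 0 := by
    constructor
    · intro h
      by_contra hm0
      exact entriesFrom_ne_nil m hm0 0 h
    · intro h; rw [h]; exact entriesFrom_zero 0
  by_cases hr0 : r ≠ 0
  · simp [hr0]
  · by_cases hm0 : m = 0 <;> simp [hr0, hm0, hnil, entriesFrom_zero]
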